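-- pv_equiv track=rewrite | github.com/sneed-and-feed/INCARNATE-SOPHIA-5.2.1 | hyper_sovereign.py | to_dozen_str
-- ===== SOURCE A (Python) =====
-- def to_dozen_str(n):
--     # Returns the 'Vibe' of the number in Dozenal
--     chars = "0123456789XE" # X=Dec, E=Elv
--     if n == 0: return "0"
--     s = ""
--     while n > 0:
--         s = chars[n % 12] + s
--         n //= 12
--     return s
-- ===== SOURCE B (Python) =====
-- def to_dozen_str(n):
--     # Returns the 'Vibe' of the number in Dozenal
--     chars = "0123456789XE"  # X=Dec, E=Elv
--     if n <= 0:
--         return "0" if n == 0 else ""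
--     p = 0
--     while 12 ** (p + 1) <= n:
--         p += 1
--     out = ""
--     while p >= 0:
--         out += chars[(n // 12 ** p) % 12]
--         p -= 1
--     return out
-- ===== Notes on version B (the rewrite author's own statement) =====
-- stated objective: alternative
-- what changed: B emits digits most-significant-first: it locates the highest base power not exceeding n and extracts each digit by division and modulus, instead of A's prepend-while-shrinking-n loop.
import Mathlib
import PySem

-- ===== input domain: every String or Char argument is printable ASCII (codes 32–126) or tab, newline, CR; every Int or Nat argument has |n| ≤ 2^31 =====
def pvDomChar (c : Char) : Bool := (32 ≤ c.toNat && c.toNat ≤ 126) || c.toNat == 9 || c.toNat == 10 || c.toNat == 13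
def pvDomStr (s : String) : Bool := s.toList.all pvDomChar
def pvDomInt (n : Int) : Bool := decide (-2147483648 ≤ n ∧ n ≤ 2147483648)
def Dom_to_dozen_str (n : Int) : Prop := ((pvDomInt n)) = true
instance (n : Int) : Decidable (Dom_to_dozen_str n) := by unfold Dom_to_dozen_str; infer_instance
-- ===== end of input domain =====

-- B is an alternative, same-cost decomposition: it emits digits most-significant-first from the
-- highest power of 12, instead of A's prepend-while-shrinking loop.

-- ===== PORT A =====
-- chars = "0123456789XE", as a list of code points; chars[i] with i = n % 12 ∈ [0,12) is always
-- in range, so the .getD ' ' default in the ports below is never taken.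
def pvDozChars : List Char := "0123456789XE".toList

-- the 'while n > 0: s = chars[n % 12] + s; n //= 12' loop of A
def pvAloop (n : Int) (s : List Char) : List Char :=
  if 0 < n then
    pvAloop (PySem.Int.floordiv n 12)
      ((PySem.List.pyGet? pvDozChars (PySem.Int.mod n 12)).getD ' ' :: s)
  else s
termination_by n.toNat
decreasing_by
  have h1 : PySem.Int.floordiv n 12 < n := by
    rw [PySem.Int.floordiv_lt_iff_lt_mul (by omega : (0:Int) < 12)]; omega
  omega

def to_dozen_str (n : Int) : String :=
  if n = 0 then "0" else String.ofList (pvAloop n [])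

-- ===== PORT B =====
-- the 'while 12 ** (p + 1) <= n: p += 1' loop of B
def pvFindP (n : Int) (p : Nat) : Nat :=
  if h : (12 : Int) ^ (p + 1) ≤ n then pvFindP n (p + 1) else p
termination_by n.toNat + 1 - 12 ^ p
decreasing_by
  have hlt : (12 : Nat) ^ p < 12 ^ (p + 1) := Nat.pow_lt_pow_succ (by norm_num)
  have hn : (12 : Nat) ^ (p + 1) ≤ n.toNat := by
    have hc : ((12 ^ (p + 1) : Nat) : Int) ≤ n := by push_cast; exact h
    omega
  omega

-- the 'while p >= 0: out += chars[(n // 12 ** p) % 12]; p -= 1' loop of B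
def pvEmit (n : Int) (p : Nat) (out : List Char) : List Char :=
  let out' := out ++
    [(PySem.List.pyGet? pvDozChars
        (PySem.Int.mod (PySem.Int.floordiv n ((12 : Int) ^ p)) 12)).getD ' ']
  match p with
  | 0 => out'
  | q + 1 => pvEmit n q out'

def to_dozen_str_alt (n : Int) : String :=
  if n ≤ 0 then (if n = 0 then "0" else "")
  else String.ofList (pvEmit n (pvFindP n 0) [])

-- ===== PRECONDITION & SPEC =====
def Spec_to_dozen_str (n : Int) (out : String) : Prop := out = to_dozen_str_alt n
instance (n : Int) (out : String) : Decidable (Spec_to_dozen_str n out) := by unfold Spec_to_dozen_str; infer_instance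

-- ===== CLAIM (what is proved, stated in full; the proofs are below) =====
def Claim_equal_to_dozen_str : Prop := ∀ (n : Int), Dom_to_dozen_str n → Spec_to_dozen_str n (to_dozen_str n)

-- ===== LEMMAS AND PROOFS =====

-- the digit list for powers p, p-1, …, 0, most significant first (proof-side characterisation)
def pvDigits (n : Int) : Nat → List Char
  | 0 => [(PySem.List.pyGet? pvDozChars
        (PySem.Int.mod (PySem.Int.floordiv n ((12 : Int) ^ (0 : Nat))) 12)).getD ' ']
  | q + 1 => (PySem.List.pyGet? pvDozChars
        (PySem.Int.mod (PySem.Int.floordiv n ((12 : Int) ^ (q + 1))) 12)).getD ' '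
      :: pvDigits n q

theorem pvEmit_eq (n : Int) (p : Nat) (out : List Char) :
    pvEmit n p out = out ++ pvDigits n p := by
  induction p generalizing out with
  | zero => simp [pvEmit, pvDigits]
  | succ q ih => simp [pvEmit, pvDigits, ih]

theorem pvFloordiv_one (n : Int) : PySem.Int.floordiv n 1 = n := by
  rw [PySem.Int.floordiv_eq_ediv_of_pos (by omega : (0:Int) < 1)]; exact Int.ediv_one n

theorem pvFloordiv_pow (n : Int) (q : Nat) :
    PySem.Int.floordiv (PySem.Int.floordiv n 12) ((12 : Int) ^ q) =
      PySem.Int.floordiv n ((12 : Int) ^ (q + 1)) := by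
  have h1 : (0 : Int) < 12 := by omega
  have h2 : (0 : Int) < (12 : Int) ^ q := by positivity
  have h3 : (0 : Int) < (12 : Int) ^ (q + 1) := by positivity
  rw [PySem.Int.floordiv_eq_ediv_of_pos h1,
      PySem.Int.floordiv_eq_ediv_of_pos h2,
      PySem.Int.floordiv_eq_ediv_of_pos h3,
      Int.ediv_ediv_of_nonneg (by omega), pow_succ']

theorem pvDigits_shift (n : Int) (p : Nat) :
    pvDigits n (p + 1) =
      pvDigits (PySem.Int.floordiv n 12) p ++
        [(PySem.List.pyGet? pvDozChars (PySem.Int.mod n 12)).getD ' '] := by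
  induction p with
  | zero =>
    simp only [pvDigits, pow_zero, pvFloordiv_one, List.cons_append, List.nil_append]
    norm_num
  | succ q ih =>
    show _ :: pvDigits n (q + 1) = _
    rw [ih]
    simp only [pvDigits, pvFloordiv_pow n (q + 1), List.cons_append]

theorem pvAloop_bracket (p : Nat) (n : Int) (s : List Char)
    (h1 : (12 : Int) ^ p ≤ n) (h2 : n < (12 : Int) ^ (p + 1)) :
    pvAloop n s = pvDigits n p ++ s := by
  induction p generalizing n s with
  | zero =>
    have hn : 0 < n := by simpa using h1
    rw [pvAloop, if_pos hn]
    have hz : PySem.Int.floordiv n 12 = 0 := by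
      rw [PySem.Int.floordiv_eq_ediv_of_pos (by omega : (0:Int) < 12)]
      apply Int.ediv_eq_zero_of_lt (by omega)
      simpa using h2
    rw [hz, pvAloop, if_neg (by omega)]
    simp [pvDigits]
  | succ q ih =>
    have hq : (0 : Int) < (12 : Int) ^ (q + 1) := by positivity
    have hn : 0 < n := by omega
    rw [pvAloop, if_pos hn]
    have hb1 : (12 : Int) ^ q ≤ PySem.Int.floordiv n 12 := by
      rw [PySem.Int.le_floordiv_iff_mul_le (by omega : (0:Int) < 12)]
      calc (12:Int) ^ q * 12 = 12 ^ (q + 1) := by ring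
        _ ≤ n := h1
    have hb2 : PySem.Int.floordiv n 12 < (12 : Int) ^ (q + 1) := by
      rw [PySem.Int.floordiv_lt_iff_lt_mul (by omega : (0:Int) < 12)]
      calc n < (12:Int) ^ (q + 2) := h2
        _ = 12 ^ (q + 1) * 12 := by ring
    rw [ih _ _ hb1 hb2, pvDigits_shift]; simp

theorem pvFindP_bracket (n : Int) (p : Nat) (h : (12 : Int) ^ p ≤ n) :
    (12 : Int) ^ pvFindP n p ≤ n ∧ n < (12 : Int) ^ (pvFindP n p + 1) := by
  rw [pvFindP]
  split
  · next hc =>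
    exact pvFindP_bracket n (p + 1) hc
  · next hc => exact ⟨h, by omega⟩
termination_by n.toNat + 1 - 12 ^ p
decreasing_by
  have hlt : (12 : Nat) ^ p < 12 ^ (p + 1) := Nat.pow_lt_pow_succ (by norm_num)
  have hn : (12 : Nat) ^ (p + 1) ≤ n.toNat := by
    have hcc : ((12 ^ (p + 1) : Nat) : Int) ≤ n := by push_cast; omega
    omega
  omega

-- ===== VERDICT (by name: the statement is the Claim_ definition above) =====
theorem to_dozen_str_spec : Claim_equal_to_dozen_str := by
  intro n _
  unfold Spec_to_dozen_str to_dozen_str to_dozen_str_alt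
  by_cases h0 : n = 0
  · simp [h0]
  · rw [if_neg h0]
    by_cases hneg : n ≤ 0
    · rw [if_pos hneg, if_neg h0, pvAloop, if_neg (by omega)]
    · rw [if_neg hneg]
      have h1 : (12 : Int) ^ (0 : Nat) ≤ n := by simpa using (by omega : (1:Int) ≤ n)
      obtain ⟨hb1, hb2⟩ := pvFindP_bracket n 0 h1
      rw [pvAloop_bracket (pvFindP n 0) n [] hb1 hb2, pvEmit_eq]
      simp
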